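-- pv_equiv track=rewrite | github.com/qs-ftw/RepoDoctify | skills/repo-doctify/repodoctify/analysis.py | _detect_repo_kind
-- ===== SOURCE A (Python) =====
-- def _detect_repo_kind(primary_language: str, top_level_files: list[str], file_inventory: list[str]) -> str:
--     if primary_language == "python":
--         if "pyproject.toml" in top_level_files or "setup.py" in top_level_files:
--             return "python_package"
--         return "python_repo"
--     if primary_language == "typescript":
--         if "package.json" in top_level_files:
--             return "node_typescript"
--         return "typescript_repo"
--     if primary_language == "javascript":
--         if "package.json" in top_level_files:
--             return "node_javascript"
--         return "javascript_repo"
--     if primary_language == "go":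
--         return "go_module" if "go.mod" in top_level_files else "go_repo"
--     if primary_language == "rust":
--         return "rust_crate" if "Cargo.toml" in top_level_files else "rust_repo"
--     if primary_language == "java":
--         return "java_repo"
--     if any(path.endswith(".md") for path in file_inventory):
--         return "docs_heavy_repo"
--     return "generic_repo"
-- ===== SOURCE B (Python) =====
-- # Inverted lookup: scan the top-level files once, mapping each file through a
-- # marker-file -> result dict for the language; the no-marker default is synthesized
-- # as f"{language}_repo" instead of being listed per branch.
-- _MARKER_RESULT = {
--     "python": {"pyproject.toml": "python_package", "setup.py": "python_package"},
--     "typescript": {"package.json": "node_typescript"},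
--     "javascript": {"package.json": "node_javascript"},
--     "go": {"go.mod": "go_module"},
--     "rust": {"Cargo.toml": "rust_crate"},
--     "java": {},
-- }
--
-- def _detect_repo_kind(primary_language: str, top_level_files: list[str], file_inventory: list[str]) -> str:
--     markers = _MARKER_RESULT.get(primary_language)
--     if markers is None:
--         return "docs_heavy_repo" if any(p.endswith(".md") for p in file_inventory) else "generic_repo"
--     return next((markers[f] for f in top_level_files if f in markers),
--                 primary_language + "_repo")
-- ===== Notes on version B (the rewrite author's own statement) =====
-- stated objective: idiomatic
-- what changed: Inverts the traversal: instead of testing each hard-coded marker for membership in the file list per language branch, B makes a single pass over top_level_files looking each file up in a marker-file->result dict for the language, and synthesizes the no-marker answer as primary_language+'_repo' instead of returning per-branch literals.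
import Mathlib
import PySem

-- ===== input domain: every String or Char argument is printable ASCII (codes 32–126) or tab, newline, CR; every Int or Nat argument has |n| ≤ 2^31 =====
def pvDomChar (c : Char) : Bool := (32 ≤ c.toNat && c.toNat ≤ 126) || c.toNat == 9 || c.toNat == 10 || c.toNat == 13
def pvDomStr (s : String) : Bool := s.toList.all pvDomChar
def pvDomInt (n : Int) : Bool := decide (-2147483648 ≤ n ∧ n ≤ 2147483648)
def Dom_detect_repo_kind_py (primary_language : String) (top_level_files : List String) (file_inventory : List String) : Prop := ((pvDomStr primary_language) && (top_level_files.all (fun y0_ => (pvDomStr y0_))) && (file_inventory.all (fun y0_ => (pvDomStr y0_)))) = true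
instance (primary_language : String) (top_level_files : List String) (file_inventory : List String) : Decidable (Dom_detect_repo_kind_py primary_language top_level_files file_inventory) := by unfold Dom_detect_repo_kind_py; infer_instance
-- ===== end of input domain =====

-- B inverts the traversal: one pass over top_level_files through a marker-file->result dict, default synthesized as language ++ "_repo" (idiomatic).

-- ===== PORT A =====
def detect_repo_kind_py (primary_language : String) (top_level_files : List String) (file_inventory : List String) : String :=
  if primary_language = "python" then
    if top_level_files.contains "pyproject.toml" || top_level_files.contains "setup.py" then
      "python_package"
    else "python_repo"
  else if primary_language = "typescript" then
    if top_level_files.contains "package.json" then "node_typescript" else "typescript_repo"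
  else if primary_language = "javascript" then
    if top_level_files.contains "package.json" then "node_javascript" else "javascript_repo"
  else if primary_language = "go" then
    if top_level_files.contains "go.mod" then "go_module" else "go_repo"
  else if primary_language = "rust" then
    if top_level_files.contains "Cargo.toml" then "rust_crate" else "rust_repo"
  else if primary_language = "java" then
    "java_repo"
  else if file_inventory.any (fun path => PySem.Str.endswith path ".md") then
    "docs_heavy_repo"
  else "generic_repo"

-- ===== PORT B =====
-- marker-file -> result tables, one per language (B's _MARKER_RESULT)
def pvMarkerResult : PySem.Dict String (PySem.Dict String String) :=
  PySem.Dict.mk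
  [("python", PySem.Dict.mk [("pyproject.toml", "python_package"), ("setup.py", "python_package")]),
   ("typescript", PySem.Dict.mk [("package.json", "node_typescript")]),
   ("javascript", PySem.Dict.mk [("package.json", "node_javascript")]),
   ("go", PySem.Dict.mk [("go.mod", "go_module")]),
   ("rust", PySem.Dict.mk [("Cargo.toml", "rust_crate")]),
   ("java", PySem.Dict.mk [])]

def detect_repo_kind_py_alt (primary_language : String) (top_level_files : List String) (file_inventory : List String) : String :=
  match PySem.Dict.get? pvMarkerResult primary_language with
  | none =>
      if file_inventory.any (fun p => PySem.Str.endswith p ".md") then "docs_heavy_repo"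
      else "generic_repo"
  | some markers =>
      -- next((markers[f] for f in top_level_files if f in markers), primary_language + "_repo")
      match top_level_files.findSome? (fun f => PySem.Dict.get? markers f) with
      | some r => r
      | none => primary_language ++ "_repo"

-- ===== PRECONDITION & SPEC =====
def Spec_detect_repo_kind_py (primary_language : String) (top_level_files : List String) (file_inventory : List String) (out : String) : Prop := out = detect_repo_kind_py_alt primary_language top_level_files file_inventory
instance (primary_language : String) (top_level_files : List String) (file_inventory : List String) (out : String) : Decidable (Spec_detect_repo_kind_py primary_language top_level_files file_inventory out) := by unfold Spec_detect_repo_kind_py; infer_instance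

-- ===== CLAIM (what is proved, stated in full; the proofs are below) =====
def Claim_equal_detect_repo_kind_py : Prop := ∀ (primary_language : String) (top_level_files : List String) (file_inventory : List String), Dom_detect_repo_kind_py primary_language top_level_files file_inventory → Spec_detect_repo_kind_py primary_language top_level_files file_inventory (detect_repo_kind_py primary_language top_level_files file_inventory)

-- ===== LEMMAS AND PROOFS =====

-- get? of an empty literal dict
theorem get?_nil_str (x : String) : (PySem.Dict.mk ([] : List (String × String))).get? x = none := rfl

-- one pass of B's generator over a singleton marker dict = a membership test
theorem findSome?_single (k v : String) :
    ∀ tlf : List String, tlf.findSome? (fun f => PySem.Dict.get? (PySem.Dict.mk [(k, v)]) f) =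
      if tlf.contains k then some v else none := by
  intro tlf
  induction tlf with
  | nil => rfl
  | cons x xs ih =>
    by_cases h : k = x
    · have hg : PySem.Dict.get? (PySem.Dict.mk [(k, v)]) x = some v := by
        simp [PySem.Dict.get?_mk_cons, h]
      rw [List.findSome?_cons, hg]
      simp [h]
    · have hb : (k == x) = false := by simp [h]
      have hg : PySem.Dict.get? (PySem.Dict.mk [(k, v)]) x = none := by
        rw [PySem.Dict.get?_mk_cons, hb]; simp [get?_nil_str]
      rw [List.findSome?_cons, hg, ih]
      simp [h]

-- one pass of B's generator over a two-key marker dict (both values v) = two membership tests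
theorem findSome?_pair (k1 k2 v : String) :
    ∀ tlf : List String, tlf.findSome? (fun f => PySem.Dict.get? (PySem.Dict.mk [(k1, v), (k2, v)]) f) =
      if tlf.contains k1 || tlf.contains k2 then some v else none := by
  intro tlf
  induction tlf with
  | nil => rfl
  | cons x xs ih =>
    by_cases h1 : k1 = x
    · have hg : PySem.Dict.get? (PySem.Dict.mk [(k1, v), (k2, v)]) x = some v := by
        simp [PySem.Dict.get?_mk_cons, h1]
      rw [List.findSome?_cons, hg]
      simp [h1]
    · have hb1 : (k1 == x) = false := by simp [h1]
      by_cases h2 : k2 = x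
      · have hg : PySem.Dict.get? (PySem.Dict.mk [(k1, v), (k2, v)]) x = some v := by
          rw [PySem.Dict.get?_mk_cons, hb1]; simp [PySem.Dict.get?_mk_cons, h2]
        rw [List.findSome?_cons, hg]
        simp [h2]
      · have hb2 : (k2 == x) = false := by simp [h2]
        have hg : PySem.Dict.get? (PySem.Dict.mk [(k1, v), (k2, v)]) x = none := by
          rw [PySem.Dict.get?_mk_cons, hb1, PySem.Dict.get?_mk_cons, hb2]; simp [get?_nil_str]
        rw [List.findSome?_cons, hg, ih]
        simp [h1, h2]

theorem detect_repo_kind_py_spec : Claim_equal_detect_repo_kind_py := by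
  intro pl tlf fi _
  unfold Spec_detect_repo_kind_py detect_repo_kind_py detect_repo_kind_py_alt
  by_cases h1 : pl = "python"
  · subst h1
    have hg : PySem.Dict.get? pvMarkerResult "python" =
        some (PySem.Dict.mk [("pyproject.toml", "python_package"), ("setup.py", "python_package")]) := by
      simp [pvMarkerResult, PySem.Dict.get?_mk_cons]
    rw [hg]
    simp only [findSome?_pair]
    split_ifs <;> simp_all
  by_cases h2 : pl = "typescript"
  · subst h2
    have hg : PySem.Dict.get? pvMarkerResult "typescript" =
        some (PySem.Dict.mk [("package.json", "node_typescript")]) := by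
      simp [pvMarkerResult, PySem.Dict.get?_mk_cons]
    rw [hg]
    simp only [findSome?_single]
    split_ifs <;> simp_all
  by_cases h3 : pl = "javascript"
  · subst h3
    have hg : PySem.Dict.get? pvMarkerResult "javascript" =
        some (PySem.Dict.mk [("package.json", "node_javascript")]) := by
      simp [pvMarkerResult, PySem.Dict.get?_mk_cons]
    rw [hg]
    simp only [findSome?_single]
    split_ifs <;> simp_all
  by_cases h4 : pl = "go"
  · subst h4
    have hg : PySem.Dict.get? pvMarkerResult "go" =
        some (PySem.Dict.mk [("go.mod", "go_module")]) := by
      simp [pvMarkerResult, PySem.Dict.get?_mk_cons]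
    rw [hg]
    simp only [findSome?_single]
    split_ifs <;> simp_all
  by_cases h5 : pl = "rust"
  · subst h5
    have hg : PySem.Dict.get? pvMarkerResult "rust" =
        some (PySem.Dict.mk [("Cargo.toml", "rust_crate")]) := by
      simp [pvMarkerResult, PySem.Dict.get?_mk_cons]
    rw [hg]
    simp only [findSome?_single]
    split_ifs <;> simp_all
  by_cases h6 : pl = "java"
  · subst h6
    have hg : PySem.Dict.get? pvMarkerResult "java" = some (PySem.Dict.mk []) := by
      simp [pvMarkerResult, PySem.Dict.get?_mk_cons]
    have hnone : ∀ l : List String,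
        l.findSome? (fun f => PySem.Dict.get? (PySem.Dict.mk ([] : List (String × String))) f) = none := by
      intro l
      induction l with
      | nil => rfl
      | cons x xs ih => rw [List.findSome?_cons, get?_nil_str]; exact ih
    rw [hg]
    simp [hnone]
  · have hb1 : (("python" : String) == pl) = false := by simp [Ne.symm h1]
    have hb2 : (("typescript" : String) == pl) = false := by simp [Ne.symm h2]
    have hb3 : (("javascript" : String) == pl) = false := by simp [Ne.symm h3]
    have hb4 : (("go" : String) == pl) = false := by simp [Ne.symm h4]
    have hb5 : (("rust" : String) == pl) = false := by simp [Ne.symm h5]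
    have hb6 : (("java" : String) == pl) = false := by simp [Ne.symm h6]
    have hn : PySem.Dict.get? pvMarkerResult pl = none := by
      unfold pvMarkerResult
      rw [PySem.Dict.get?_mk_cons, hb1, PySem.Dict.get?_mk_cons, hb2, PySem.Dict.get?_mk_cons, hb3,
        PySem.Dict.get?_mk_cons, hb4, PySem.Dict.get?_mk_cons, hb5, PySem.Dict.get?_mk_cons, hb6]
      rfl
    rw [hn]
    simp [h1, h2, h3, h4, h5, h6]
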